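-- pv_equiv track=rewrite | github.com/MizuguchiJAkira/strecker | report/sections/temporal.py | _classify_pattern
-- ===== SOURCE A (Python) =====
-- def _classify_pattern(hourly: dict):
--     """Classify activity as Nocturnal/Diurnal/Crepuscular."""
--     night = sum(hourly.get(h, 0)
--                 for h in list(range(0, 5)) + list(range(21, 24)))
--     day = sum(hourly.get(h, 0) for h in range(7, 18))
--     total = sum(hourly.values()) or 1
--     night_pct = int(night / total * 100)
--     day_pct = int(day / total * 100)
--     if night_pct > 65:
--         return "Nocturnal", night_pct, day_pct
--     if day_pct > 65:
--         return "Diurnal", night_pct, day_pct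
--     return "Crepuscular", night_pct, day_pct
-- ===== SOURCE B (Python) =====
-- _CATEGORY = {h: "night" for h in range(0, 5)}
-- _CATEGORY.update({h: "night" for h in range(21, 24)})
-- _CATEGORY.update({h: "day" for h in range(7, 18)})
--
--
-- def _classify_pattern(hourly: dict):
--     """Classify activity by partitioning counts into night/day/other buckets."""
--     sums = {"night": 0, "day": 0, "other": 0}
--     for hour, count in hourly.items():
--         sums[_CATEGORY.get(hour, "other")] += count
--     total = sum(sums.values()) or 1
--     night_pct = int(sums["night"] / total * 100)
--     day_pct = int(sums["day"] / total * 100)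
--     if night_pct > 65:
--         return "Nocturnal", night_pct, day_pct
--     if day_pct > 65:
--         return "Diurnal", night_pct, day_pct
--     return "Crepuscular", night_pct, day_pct
-- ===== Notes on version B (the rewrite author's own statement) =====
-- stated objective: alternative
-- what changed: A makes three independent sum passes (night via 8 dict lookups, day via 11 lookups, total over all values); B precomputes a module-level hour-to-category table, makes one pass that partitions every count into a night/day/other bucket dict, and derives the total from the three bucket sums instead of summing the values again.
import Mathlib
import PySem

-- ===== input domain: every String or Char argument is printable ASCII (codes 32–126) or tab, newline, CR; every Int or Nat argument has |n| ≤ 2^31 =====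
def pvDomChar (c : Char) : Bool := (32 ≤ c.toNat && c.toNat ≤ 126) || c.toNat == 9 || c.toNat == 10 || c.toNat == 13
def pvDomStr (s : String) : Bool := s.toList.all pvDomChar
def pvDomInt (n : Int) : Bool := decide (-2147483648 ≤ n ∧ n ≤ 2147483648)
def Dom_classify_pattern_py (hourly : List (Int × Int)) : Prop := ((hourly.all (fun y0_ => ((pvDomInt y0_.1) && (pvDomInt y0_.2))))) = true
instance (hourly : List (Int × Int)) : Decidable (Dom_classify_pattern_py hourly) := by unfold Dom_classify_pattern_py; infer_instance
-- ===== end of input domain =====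

-- B replaces A's three independent sum passes by a precomputed hour→category table and ONE pass that
-- partitions every count into a night/day/other bucket dict, deriving the total from the three buckets
-- (objective: alternative decomposition, same O(n) cost).

-- Shared hand-written model of the Python float expression `int(x / total * 100)` (both sources contain it
-- verbatim): IEEE-754 double division (round-to-nearest, ties-to-even), exact double multiplication by 100
-- followed by the same rounding, then truncation toward zero.  Exact for every n and every t ≠ 0 of the
-- magnitudes reachable here (no overflow, no subnormals).
def pyRne (A B : Nat) : Nat :=
  let q := A / B
  let r := A % B
  if 2 * r < B then q else if B < 2 * r then q + 1 else if q % 2 = 0 then q else q + 1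

def pyPct (n t : Int) : Int :=
  if n = 0 then 0 else
  let sgn : Int := if (decide (n < 0)) == (decide (t < 0)) then 1 else -1
  let P := n.natAbs
  let Q := t.natAbs
  let d : Int := (PySem.Int.bitLength (P : Int) : Int) - (PySem.Int.bitLength (Q : Int) : Int)
  let c : Bool := if 0 ≤ d then decide ((Q <<< d.toNat) ≤ P) else decide (Q ≤ (P <<< (-d).toNat))
  let e : Int := (if c then d else d - 1) - 52
  let m : Nat := if 0 ≤ e then pyRne P (Q <<< e.toNat) else pyRne (P <<< (-e).toNat) Q
  let x := m * 100
  let shift : Nat := PySem.Int.bitLength (x : Int) - 53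
  let m2 := pyRne x (1 <<< shift)
  let E : Int := e + (shift : Int)
  let mag : Nat := if 0 ≤ E then m2 <<< E.toNat else m2 >>> (-E).toNat
  sgn * (mag : Int)

-- ===== PORT A =====
def classify_pattern_py (hourly : List (Int × Int)) : String × Int × Int :=
  let d := PySem.Dict.ofList hourly
  let night := ((PySem.List.pyRange 0 5 1 ++ PySem.List.pyRange 21 24 1).map
      (fun h => d.getD h 0)).sum
  let day := ((PySem.List.pyRange 7 18 1).map (fun h => d.getD h 0)).sum
  let total0 := d.values.sum
  let total := if total0 ≠ 0 then total0 else 1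
  let night_pct := pyPct night total
  let day_pct := pyPct day total
  if night_pct > 65 then ("Nocturnal", night_pct, day_pct)
  else if day_pct > 65 then ("Diurnal", night_pct, day_pct)
  else ("Crepuscular", night_pct, day_pct)

-- ===== PORT B =====
-- the module-level _CATEGORY table: {h: "night" for h in range(0,5)} updated with range(21,24)→"night", range(7,18)→"day"
def pvCategory : PySem.Dict Int String :=
  ((PySem.Dict.ofList ((PySem.List.pyRange 0 5 1).map (fun h => (h, "night")))).update
      ((PySem.List.pyRange 21 24 1).map (fun h => (h, "night")))).update
    ((PySem.List.pyRange 7 18 1).map (fun h => (h, "day")))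

def classify_pattern_py_alt (hourly : List (Int × Int)) : String × Int × Int :=
  let sums0 : PySem.Dict String Int := PySem.Dict.ofList [("night", 0), ("day", 0), ("other", 0)]
  let sums := (PySem.Dict.ofList hourly).items.foldl
    (fun (s : PySem.Dict String Int) p => s.modify (pvCategory.getD p.1 "other") 0 (· + p.2)) sums0
  let total0 := sums.values.sum
  let total := if total0 ≠ 0 then total0 else 1
  let night_pct := pyPct (sums.getD "night" 0) total
  let day_pct := pyPct (sums.getD "day" 0) total
  if night_pct > 65 then ("Nocturnal", night_pct, day_pct)
  else if day_pct > 65 then ("Diurnal", night_pct, day_pct)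
  else ("Crepuscular", night_pct, day_pct)

-- ===== PRECONDITION & SPEC =====
def Spec_classify_pattern_py (hourly : List (Int × Int)) (out : String × Int × Int) : Prop := out = classify_pattern_py_alt hourly
instance (hourly : List (Int × Int)) (out : String × Int × Int) : Decidable (Spec_classify_pattern_py hourly out) := by unfold Spec_classify_pattern_py; infer_instance

-- ===== CLAIM (what is proved, stated in full; the proofs are below) =====
def Claim_equal_classify_pattern_py : Prop := ∀ (hourly : List (Int × Int)), Dom_classify_pattern_py hourly → Spec_classify_pattern_py hourly (classify_pattern_py hourly)

-- ===== LEMMAS AND PROOFS =====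

-- Sum over hs of a one-hot branch, when the hot key occurs at most once in hs.
theorem sum_map_if_eq (k : Int) (v : Int) (f : Int → Int) (hs : List Int) (hnd : hs.Nodup) :
    (hs.map (fun h => if k = h then v else f h)).sum
      = (if k ∈ hs then v - f k else 0) + (hs.map f).sum := by
  induction hs with
  | nil => simp
  | cons h tl ih =>
    rcases List.nodup_cons.mp hnd with ⟨hhtl, hndtl⟩
    by_cases hk : k = h
    · subst hk
      have : (tl.map (fun h' => if k = h' then v else f h')).sum = (tl.map f).sum := by
        refine congrArg List.sum (List.map_congr_left ?_)
        intro x hx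
        have : k ≠ x := fun hkx => hhtl (hkx ▸ hx)
        simp [this]
      simp [this]
      ring
    · have := ih hndtl
      simp [hk, this]
      by_cases hmem : k ∈ tl
      · simp [hmem]
        ring
      · simp [hmem]

-- First-match lookup with default 0, on an assoc list with distinct keys, summed over distinct hours,
-- equals the single filtered pass over the items.
theorem sum_getD_eq (l : List (Int × Int)) (hnd : (l.map (·.1)).Nodup)
    (hs : List Int) (hhs : hs.Nodup) :
    (hs.map (fun h => (PySem.Dict.mk l).getD h 0)).sum
      = (l.map (fun p => if p.1 ∈ hs then p.2 else 0)).sum := by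
  induction l with
  | nil => simp [PySem.Dict.getD_eq_get?_getD, PySem.Dict.get?]
  | cons p rest ih =>
    rcases List.nodup_cons.mp hnd with ⟨hp, hndr⟩
    have hstep : ∀ h : Int, (PySem.Dict.mk (p :: rest)).getD h 0
        = if p.1 = h then p.2 else (PySem.Dict.mk rest).getD h 0 := by
      intro h
      obtain ⟨k, v⟩ := p
      simp only [PySem.Dict.getD_eq_get?_getD, PySem.Dict.get?_mk_cons]
      by_cases hph : k = h <;> simp [hph]
    have h1 : (hs.map (fun h => (PySem.Dict.mk (p :: rest)).getD h 0)).sum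
        = (hs.map (fun h => if p.1 = h then p.2 else (PySem.Dict.mk rest).getD h 0)).sum := by
      exact congrArg List.sum (List.map_congr_left (fun h _ => hstep h))
    have hz : (PySem.Dict.mk rest).getD p.1 0 = 0 := by
      apply PySem.Dict.getD_of_not_contains
      simp only [PySem.Dict.contains_eq_decide_mem_keys, PySem.Dict.keys,
        decide_eq_false_iff_not]
      exact fun hmem => hp (by simpa using hmem)
    rw [h1, sum_map_if_eq p.1 p.2 _ hs hhs, ih hndr, hz]
    by_cases hmem : p.1 ∈ hs <;> simp [hmem]

-- The category table, characterised pointwise.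
theorem cat_eq (h : Int) : pvCategory.getD h "other"
    = if h ∈ ([0, 1, 2, 3, 4, 21, 22, 23] : List Int) then "night"
      else if 7 ≤ h ∧ h ≤ 17 then "day" else "other" := by
  have hcat : pvCategory = PySem.Dict.mk
      [(0, "night"), (1, "night"), (2, "night"), (3, "night"), (4, "night"),
       (21, "night"), (22, "night"), (23, "night"),
       (7, "day"), (8, "day"), (9, "day"), (10, "day"), (11, "day"), (12, "day"),
       (13, "day"), (14, "day"), (15, "day"), (16, "day"), (17, "day")] := by rfl
  rw [hcat]
  by_cases hm : h ∈ ([0, 1, 2, 3, 4, 21, 22, 23] : List Int)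
  · fin_cases hm <;> rfl
  · by_cases hd : 7 ≤ h ∧ h ≤ 17
    · obtain ⟨hd1, hd2⟩ := hd
      interval_cases h <;> rfl
    · have hm' := hm
      simp only [List.mem_cons, List.not_mem_nil, or_false] at hm'
      rw [if_neg hm, if_neg hd]
      simp only [PySem.Dict.getD_eq_get?_getD, PySem.Dict.get?_mk_cons, beq_iff_eq,
    if_neg (show ¬(0:Int) = h by omega),
    if_neg (show ¬(1:Int) = h by omega),
    if_neg (show ¬(2:Int) = h by omega),
    if_neg (show ¬(3:Int) = h by omega),
    if_neg (show ¬(4:Int) = h by omega),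
    if_neg (show ¬(21:Int) = h by omega),
    if_neg (show ¬(22:Int) = h by omega),
    if_neg (show ¬(23:Int) = h by omega),
    if_neg (show ¬(7:Int) = h by omega),
    if_neg (show ¬(8:Int) = h by omega),
    if_neg (show ¬(9:Int) = h by omega),
    if_neg (show ¬(10:Int) = h by omega),
    if_neg (show ¬(11:Int) = h by omega),
    if_neg (show ¬(12:Int) = h by omega),
    if_neg (show ¬(13:Int) = h by omega),
    if_neg (show ¬(14:Int) = h by omega),
    if_neg (show ¬(15:Int) = h by omega),
    if_neg (show ¬(16:Int) = h by omega),
    if_neg (show ¬(17:Int) = h by omega)]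
      rfl

-- B's bucket loop, computed: starting from the three-key bucket dict, it adds the night/day/other
-- partition sums of the traversed items to the respective buckets.
theorem fold_buckets (l : List (Int × Int)) (a b c : Int) :
    (l.foldl (fun (s : PySem.Dict String Int) p =>
        s.modify (pvCategory.getD p.1 "other") 0 (· + p.2))
      (PySem.Dict.mk [("night", a), ("day", b), ("other", c)]))
    = PySem.Dict.mk
        [("night", a + (l.map (fun p => if p.1 ∈ ([0, 1, 2, 3, 4, 21, 22, 23] : List Int) then p.2 else 0)).sum),
         ("day", b + (l.map (fun p => if ¬ p.1 ∈ ([0, 1, 2, 3, 4, 21, 22, 23] : List Int) ∧ 7 ≤ p.1 ∧ p.1 ≤ 17 then p.2 else 0)).sum),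
         ("other", c + (l.map (fun p => if ¬ p.1 ∈ ([0, 1, 2, 3, 4, 21, 22, 23] : List Int) ∧ ¬ (7 ≤ p.1 ∧ p.1 ≤ 17) then p.2 else 0)).sum)] := by
  induction l generalizing a b c with
  | nil => simp
  | cons p rest ih =>
    rw [List.foldl_cons]
    by_cases h1 : p.1 ∈ ([0, 1, 2, 3, 4, 21, 22, 23] : List Int)
    · have hstep : (PySem.Dict.mk [("night", a), ("day", b), ("other", c)]).modify
          (pvCategory.getD p.1 "other") 0 (· + p.2)
          = PySem.Dict.mk [("night", a + p.2), ("day", b), ("other", c)] := by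
        rw [cat_eq]; simp only [h1, if_true]; rfl
      rw [hstep, ih]
      simp only [List.mem_cons, List.not_mem_nil, or_false] at h1
      simp [add_assoc] <;> omega
    · by_cases h2 : 7 ≤ p.1 ∧ p.1 ≤ 17
      · have hstep : (PySem.Dict.mk [("night", a), ("day", b), ("other", c)]).modify
            (pvCategory.getD p.1 "other") 0 (· + p.2)
            = PySem.Dict.mk [("night", a), ("day", b + p.2), ("other", c)] := by
          rw [cat_eq]; simp only [h1, if_false, h2, if_true]; rfl
        rw [hstep, ih]
        simp only [List.mem_cons, List.not_mem_nil, or_false] at h1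
        simp [add_assoc] <;> omega
      · have hstep : (PySem.Dict.mk [("night", a), ("day", b), ("other", c)]).modify
            (pvCategory.getD p.1 "other") 0 (· + p.2)
            = PySem.Dict.mk [("night", a), ("day", b), ("other", c + p.2)] := by
          rw [cat_eq]; simp only [h1, if_false, h2]; rfl
        rw [hstep, ih]
        simp only [List.mem_cons, List.not_mem_nil, or_false] at h1
        simp [add_assoc] <;> omega

theorem classify_pattern_py_spec : Claim_equal_classify_pattern_py := by
  intro hourly _
  unfold Spec_classify_pattern_py classify_pattern_py classify_pattern_py_alt
  have hnd : ((PySem.Dict.ofList hourly).items.map (fun p => p.1)).Nodup := by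
    have := PySem.Dict.nodup_keys_ofList (ps := hourly)
    simpa [PySem.Dict.keys] using this
  have hmk : PySem.Dict.mk (PySem.Dict.ofList hourly).items = PySem.Dict.ofList hourly := rfl
  set l := (PySem.Dict.ofList hourly).items with hl
  -- night sums agree
  have hnightset : PySem.List.pyRange 0 5 1 ++ PySem.List.pyRange 21 24 1
      = ([0, 1, 2, 3, 4, 21, 22, 23] : List Int) := by decide
  have hnight : ((PySem.List.pyRange 0 5 1 ++ PySem.List.pyRange 21 24 1).map
        (fun h => (PySem.Dict.ofList hourly).getD h 0)).sum
      = (l.map (fun p => if p.1 ∈ ([0, 1, 2, 3, 4, 21, 22, 23] : List Int) then p.2 else 0)).sum := by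
    rw [hnightset, ← hmk, sum_getD_eq _ hnd _ (by decide)]
  -- day sums agree (A's day range is disjoint from the night hours)
  have hday : ((PySem.List.pyRange 7 18 1).map (fun h => (PySem.Dict.ofList hourly).getD h 0)).sum
      = (l.map (fun p => if ¬ p.1 ∈ ([0, 1, 2, 3, 4, 21, 22, 23] : List Int) ∧ 7 ≤ p.1 ∧ p.1 ≤ 17 then p.2 else 0)).sum := by
    rw [← hmk, sum_getD_eq _ hnd _ (by decide)]
    refine congrArg List.sum (List.map_congr_left ?_)
    intro p _
    have hiff : p.1 ∈ PySem.List.pyRange 7 18 1 ↔ 7 ≤ p.1 ∧ p.1 ≤ 17 := by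
      rw [PySem.List.mem_pyRange_one]
      omega
    have hdisj : (7 ≤ p.1 ∧ p.1 ≤ 17) → ¬ p.1 ∈ ([0, 1, 2, 3, 4, 21, 22, 23] : List Int) := by
      intro hdp hmem
      simp only [List.mem_cons, List.not_mem_nil, or_false] at hmem
      omega
    by_cases hp : 7 ≤ p.1 ∧ p.1 ≤ 17
    · simp [hp, hiff, hdisj hp]
    · simp [hp, hiff]
  -- totals agree: the three buckets partition the values
  have htot : ((PySem.Dict.ofList hourly).values).sum
      = (l.map (fun p => if p.1 ∈ ([0, 1, 2, 3, 4, 21, 22, 23] : List Int) then p.2 else 0)).sum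
        + ((l.map (fun p => if ¬ p.1 ∈ ([0, 1, 2, 3, 4, 21, 22, 23] : List Int) ∧ 7 ≤ p.1 ∧ p.1 ≤ 17 then p.2 else 0)).sum
          + (l.map (fun p => if ¬ p.1 ∈ ([0, 1, 2, 3, 4, 21, 22, 23] : List Int) ∧ ¬ (7 ≤ p.1 ∧ p.1 ≤ 17) then p.2 else 0)).sum) := by
    have hv : (PySem.Dict.ofList hourly).values = l.map (fun p => p.2) := rfl
    rw [hv]
    induction l with
    | nil => simp
    | cons p rest ihl =>
      simp only [List.map_cons, List.sum_cons, ihl]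
      by_cases h1 : p.1 ∈ ([0, 1, 2, 3, 4, 21, 22, 23] : List Int) <;>
        by_cases h2 : 7 ≤ p.1 ∧ p.1 ≤ 17 <;> simp [h1, h2] <;> ring
  have h0 : (PySem.Dict.ofList [("night", (0:Int)), ("day", 0), ("other", 0)])
      = PySem.Dict.mk [("night", 0), ("day", 0), ("other", 0)] := rfl
  have hgn : ∀ x y z : Int,
      (PySem.Dict.mk [("night", x), ("day", y), ("other", z)]).getD "night" 0 = x :=
    fun _ _ _ => rfl
  have hgd : ∀ x y z : Int,
      (PySem.Dict.mk [("night", x), ("day", y), ("other", z)]).getD "day" 0 = y :=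
    fun _ _ _ => rfl
  have hvs : ∀ x y z : Int,
      (PySem.Dict.mk [("night", x), ("day", y), ("other", z)]).values.sum = x + (y + (z + 0)) :=
    fun _ _ _ => rfl
  simp only [h0, fold_buckets, hgn, hgd, hvs, zero_add, add_zero, hnight, hday, htot]
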